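-- pv_equiv track=rewrite | github.com/qhngo/Multi-agent-routing-orchestration-demo | src/app/services/chat_service.py | _extract_handling_agent
-- ===== SOURCE A (Python) =====
-- def _extract_handling_agent(trace: list[str]) -> str | None:
--     selected_prefix = "router:selected:"
--     fallback_prefix = "router:fallback:"
--     for entry in trace:
--         if entry.startswith(selected_prefix):
--             return entry[len(selected_prefix):].strip() or None
--     for entry in trace:
--         if entry.startswith(fallback_prefix):
--             return entry[len(fallback_prefix):].strip() or None
--     return None
-- ===== SOURCE B (Python) =====
-- def _extract_handling_agent(trace: list[str]) -> str | None:
--     selected_prefix = "router:selected:"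
--     fallback_prefix = "router:fallback:"
--     fallback = None
--     have_fallback = False
--     for entry in trace:
--         if entry.startswith(selected_prefix):
--             return entry[len(selected_prefix):].strip() or None
--         if not have_fallback and entry.startswith(fallback_prefix):
--             fallback = entry[len(fallback_prefix):].strip() or None
--             have_fallback = True
--     return fallback
-- ===== Notes on version B (the rewrite author's own statement) =====
-- stated objective: simpler
-- what changed: Replaces A's two sequential scans of the trace by a single pass that returns immediately on the first selected entry while capturing the first fallback value in an accumulator.
import Mathlib
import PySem

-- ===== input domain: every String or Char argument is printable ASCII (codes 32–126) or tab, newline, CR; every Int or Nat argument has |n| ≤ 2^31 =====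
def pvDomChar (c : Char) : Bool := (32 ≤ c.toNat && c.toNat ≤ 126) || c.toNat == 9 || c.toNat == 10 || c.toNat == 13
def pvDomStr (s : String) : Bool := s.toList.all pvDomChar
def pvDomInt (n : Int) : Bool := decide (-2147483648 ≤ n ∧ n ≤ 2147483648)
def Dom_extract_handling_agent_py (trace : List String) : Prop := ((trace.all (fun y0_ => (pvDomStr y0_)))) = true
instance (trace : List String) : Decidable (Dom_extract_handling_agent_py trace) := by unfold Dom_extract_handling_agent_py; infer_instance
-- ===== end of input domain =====

-- B replaces A's two sequential scans with one pass that captures the first fallback value; objective: simpler.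

-- ===== PORT A =====
-- `entry[len(prefix):].strip() or None` for A
def pvStripOrNoneA (s : String) : Option String :=
  let t := PySem.Str.strip s
  if t = "" then none else some t

-- A's first for-loop (early return as Option of the returned value)
def pvLoopSelA : List String → Option (Option String)
  | [] => none
  | entry :: rest =>
      if PySem.Str.startswith entry "router:selected:" then
        some (pvStripOrNoneA (PySem.Str.slice entry (some 16) none))
      else pvLoopSelA rest

-- A's second for-loop
def pvLoopFbA : List String → Option (Option String)
  | [] => none
  | entry :: rest =>
      if PySem.Str.startswith entry "router:fallback:" then
        some (pvStripOrNoneA (PySem.Str.slice entry (some 16) none))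
      else pvLoopFbA rest

def extract_handling_agent_py (trace : List String) : Option String :=
  match pvLoopSelA trace with
  | some v => v
  | none =>
      match pvLoopFbA trace with
      | some v => v
      | none => none

-- ===== PORT B =====
-- `entry[len(prefix):].strip() or None` for B
def pvStripOrNoneB (s : String) : Option String :=
  let t := PySem.Str.strip s
  if t = "" then none else some t

-- B's single loop; acc encodes (have_fallback, fallback): none = not yet captured
def pvGoB : List String → Option (Option String) → Option String
  | [], acc => match acc with | some v => v | none => none
  | entry :: rest, acc =>
      if PySem.Str.startswith entry "router:selected:" then
        pvStripOrNoneB (PySem.Str.slice entry (some 16) none)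
      else if acc.isNone && PySem.Str.startswith entry "router:fallback:" then
        pvGoB rest (some (pvStripOrNoneB (PySem.Str.slice entry (some 16) none)))
      else pvGoB rest acc

def extract_handling_agent_py_alt (trace : List String) : Option String :=
  pvGoB trace none

-- ===== PRECONDITION & SPEC =====
def Spec_extract_handling_agent_py (trace : List String) (out : Option String) : Prop := out = extract_handling_agent_py_alt trace
instance (trace : List String) (out : Option String) : Decidable (Spec_extract_handling_agent_py trace out) := by unfold Spec_extract_handling_agent_py; infer_instance

-- ===== CLAIM (what is proved, stated in full; the proofs are below) =====
def Claim_equal_extract_handling_agent_py : Prop := ∀ (trace : List String), Dom_extract_handling_agent_py trace → Spec_extract_handling_agent_py trace (extract_handling_agent_py trace)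

-- ===== LEMMAS AND PROOFS =====

theorem pvGoB_char (l : List String) (acc : Option (Option String)) :
    pvGoB l acc =
      match pvLoopSelA l with
      | some v => v
      | none =>
          match acc.orElse (fun _ => pvLoopFbA l) with
          | some v => v
          | none => none := by
  induction l generalizing acc with
  | nil => cases acc <;> rfl
  | cons e rest ih =>
    have hsel : ∀ h : PySem.Str.startswith e "router:selected:" = false,
        pvLoopSelA (e :: rest) = pvLoopSelA rest := by
      intro h
      show (if PySem.Str.startswith e "router:selected:" = true then
              some (pvStripOrNoneA (PySem.Str.slice e (some 16) none))
            else pvLoopSelA rest) = pvLoopSelA rest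
      rw [h]; rfl
    have hfbeq : ∀ h : PySem.Str.startswith e "router:fallback:" = false,
        pvLoopFbA (e :: rest) = pvLoopFbA rest := by
      intro h
      show (if PySem.Str.startswith e "router:fallback:" = true then
              some (pvStripOrNoneA (PySem.Str.slice e (some 16) none))
            else pvLoopFbA rest) = pvLoopFbA rest
      rw [h]; rfl
    show (if PySem.Str.startswith e "router:selected:" = true then
            pvStripOrNoneB (PySem.Str.slice e (some 16) none)
          else if acc.isNone && PySem.Str.startswith e "router:fallback:" then
            pvGoB rest (some (pvStripOrNoneB (PySem.Str.slice e (some 16) none)))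
          else pvGoB rest acc) = _
    by_cases hs : PySem.Str.startswith e "router:selected:" = true
    · rw [if_pos hs]
      rw [show pvLoopSelA (e :: rest)
            = some (pvStripOrNoneA (PySem.Str.slice e (some 16) none)) from by
          show (if PySem.Str.startswith e "router:selected:" = true then
                  some (pvStripOrNoneA (PySem.Str.slice e (some 16) none))
                else pvLoopSelA rest) = _
          rw [if_pos hs]]
      rfl
    · rw [if_neg hs]
      rw [hsel (Bool.of_not_eq_true hs)]
      cases acc with
      | some v =>
        rw [show ((some v).isNone && PySem.Str.startswith e "router:fallback:") = false
              from rfl]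
        rw [if_neg (by simp : ¬ (false = true)), ih]
        cases pvLoopSelA rest <;> rfl
      | none =>
        rw [show ((none : Option (Option String)).isNone
              && PySem.Str.startswith e "router:fallback:")
              = PySem.Str.startswith e "router:fallback:" from Bool.true_and _]
        by_cases hf : PySem.Str.startswith e "router:fallback:" = true
        · rw [if_pos hf, ih]
          rw [show pvLoopFbA (e :: rest)
                = some (pvStripOrNoneA (PySem.Str.slice e (some 16) none)) from by
              show (if PySem.Str.startswith e "router:fallback:" = true then
                      some (pvStripOrNoneA (PySem.Str.slice e (some 16) none))
                    else pvLoopFbA rest) = _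
              rw [if_pos hf]]
          cases pvLoopSelA rest <;> rfl
        · rw [if_neg hf, ih, hfbeq (Bool.of_not_eq_true hf)]

-- ===== VERDICT (by name: the statement is the Claim_ definition above) =====
theorem extract_handling_agent_py_spec : Claim_equal_extract_handling_agent_py := by
  intro trace _
  unfold Spec_extract_handling_agent_py extract_handling_agent_py extract_handling_agent_py_alt
  rw [pvGoB_char]
  simp [Option.orElse]
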